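-- pv_equiv track=rewrite | github.com/Juyoung4/StudyAlgorithm | DSC/problem1.py | solution
-- ===== SOURCE A (Python) =====
-- def solution(st):
--     count, idx= 0, len(st)-1
--     while idx >= 0:
--         if st[idx] in (',', '~') and st[idx-1].isalpha():
--             idx -=1
--         elif st[idx] == '..' and st[idx-2].isalpha():
--             idx -= 2
--         count += 1
--         idx -=1
--     return count
-- ===== SOURCE B (Python) =====
-- def solution(st):
--     n = len(st)
--     dp = [0] * (n + 1)  # dp[k] = token count of the prefix st[:k]
--     for k in range(1, n + 1):
--         x = st[k - 1]
--         if x in (',', '~') and k >= 2 and st[k - 2].isalpha():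
--             dp[k] = dp[k - 2] + 1
--         elif x == '..' and k >= 3 and st[k - 3].isalpha():
--             dp[k] = dp[k - 3] + 1
--         else:
--             dp[k] = dp[k - 1] + 1
--     return dp[n]
-- ===== Notes on version B (the rewrite author's own statement) =====
-- stated objective: alternative
-- what changed: Replaces A's backward pointer walk (a while loop jumping the index by 1, 2 or 3 with Python negative-index wraparound reads) by a forward bottom-up dynamic program over prefixes: dp[k] = token count of st[:k] computed from dp[k-1], dp[k-2], dp[k-3] via the local merge rules, returning dp[n].
-- intended difference: On lists where the walk reaches index 1 holding '..' with an alphabetic last element, A's wraparound read st[-1] merges the first two elements and returns one less (e.g. ['a','..','a'] -> 2); B returns 3, the intended count since element -1 is not the element two places before index 1. — e.g. on solution(["a", "..", "a"]): A returns 2, B returns 3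
-- outside the precondition, e.g. on solution(['..']): A raises IndexError, B returns 1
import Mathlib
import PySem

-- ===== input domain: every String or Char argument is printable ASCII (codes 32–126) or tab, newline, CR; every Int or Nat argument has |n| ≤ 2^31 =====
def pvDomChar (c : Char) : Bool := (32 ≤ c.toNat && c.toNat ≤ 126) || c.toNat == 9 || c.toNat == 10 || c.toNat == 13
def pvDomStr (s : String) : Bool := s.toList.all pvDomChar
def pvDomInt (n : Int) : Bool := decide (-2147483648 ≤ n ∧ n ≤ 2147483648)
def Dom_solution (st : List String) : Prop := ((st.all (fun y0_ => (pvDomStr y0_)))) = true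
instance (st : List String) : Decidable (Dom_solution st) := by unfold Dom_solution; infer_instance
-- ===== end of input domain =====

-- B replaces A's backward pointer walk (with Python negative-index wraparound reads) by a forward
-- bottom-up dynamic program over prefixes: dp[k] = token count of st[:k], computed from dp[k-1],
-- dp[k-2], dp[k-3] by the local merge rules (objective: alternative). On inputs where A's
-- wraparound reads st[-1] at index 1 the two differ; see D_solution below.

-- ===== PORT A =====
-- the while loop of A; idx : Int exactly as in Python, none = IndexError (st[idx-2] on a 1-element list)
def solutionLoop (st : List String) (idx : Int) (count : Int) : Option Int :=
  if _h : idx < 0 then some count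
  else
    match PySem.List.pyGet? st idx with
    | none => none
    | some x =>
      if x = "," ∨ x = "~" then
        match PySem.List.pyGet? st (idx - 1) with
        | none => none
        | some y =>
          if PySem.Str.strIsalpha y then solutionLoop st (idx - 2) (count + 1)
          else solutionLoop st (idx - 1) (count + 1)
      else if x = ".." then
        match PySem.List.pyGet? st (idx - 2) with
        | none => none
        | some y =>
          if PySem.Str.strIsalpha y then solutionLoop st (idx - 3) (count + 1)
          else solutionLoop st (idx - 1) (count + 1)
      else solutionLoop st (idx - 1) (count + 1)
termination_by (idx + 1).toNat
decreasing_by all_goals (simp only [not_lt] at _h; omega)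

def solution (st : List String) : Int :=
  (solutionLoop st (PySem.List.len st - 1) 0).getD 0

-- ===== PORT B =====
-- Source B's loop body for one k: the three-way branch filling the next dp cell; the dp table is kept
-- latest-first (Python fills dp[k] in index order, so that assignment is this prepend;
-- dp[k-1] = getD 0, dp[k-2] = getD 1, dp[k-3] = getD 2; short-circuited reads are guarded by 2 <= k / 3 <= k)
def solutionAltStep (st : List String) (dp : List Int) (k : Int) : List Int :=
  if (st.getD (k - 1).toNat "" = "," ∨ st.getD (k - 1).toNat "" = "~") ∧ 2 ≤ k ∧
      PySem.Str.strIsalpha (st.getD (k - 2).toNat "") = true then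
    (dp.getD 1 0 + 1) :: dp
  else if st.getD (k - 1).toNat "" = ".." ∧ 3 ≤ k ∧
      PySem.Str.strIsalpha (st.getD (k - 3).toNat "") = true then
    (dp.getD 2 0 + 1) :: dp
  else (dp.getD 0 0 + 1) :: dp

-- 'for k in range(1, n + 1)' as a fold over that range; the result is dp[n], the head of the table
def solution_alt (st : List String) : Int :=
  ((PySem.List.pyRange 1 (PySem.List.len st + 1) 1).foldl (solutionAltStep st) [0]).getD 0 0

-- ===== PRECONDITION & SPEC =====
-- Pre_ excludes exactly the one-element list [".."], on which A raises IndexError (st[idx-2]).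
def Pre_solution (st : List String) : Prop := st ≠ [".."]
instance (st : List String) : Decidable (Pre_solution st) := by unfold Pre_solution; infer_instance
def pvWitness_solution : List String := (["ab", ",", "cd"])

-- On lists whose walk reaches index 1 holding ".." with an alphabetic last element, A's negative-index
-- wraparound (st[-1]) merges the first two elements and returns one less; B counts them as two, the
-- intended value since index -1 is not the element before index 1.
def D_solution (st : List String) : Prop :=
  3 ≤ st.length ∧ st.getD 1 "" = ".." ∧ PySem.Str.strIsalpha (st.getD (st.length - 1) "") = true ∧
    ¬(st.getD 2 "" = ".." ∧ PySem.Str.strIsalpha (st.getD 0 "") = true)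
instance (st : List String) : Decidable (D_solution st) := by unfold D_solution; infer_instance
def Spec_solution (st : List String) (out : Int) : Prop := ¬ D_solution st → out = solution_alt st
instance (st : List String) (out : Int) : Decidable (Spec_solution st out) := by unfold Spec_solution; infer_instance
def pvDiffWitness_solution : List String := (["a", "..", "a"])
def pvDiffWitnessOut_solution : Int × Int := (2, 3)

-- ===== CLAIM (what is proved, stated in full; the proofs are below) =====
def Claim_unchanged_solution : Prop := ∀ (st : List String), Dom_solution st → Pre_solution st → Spec_solution st (solution st)
def Claim_changed_solution : Prop := Dom_solution (pvDiffWitness_solution) ∧ Pre_solution (pvDiffWitness_solution) ∧ D_solution (pvDiffWitness_solution) ∧ solution (pvDiffWitness_solution) = pvDiffWitnessOut_solution.1 ∧ solution_alt (pvDiffWitness_solution) = pvDiffWitnessOut_solution.2 ∧ pvDiffWitnessOut_solution.1 ≠ pvDiffWitnessOut_solution.2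
def Claim_exact_solution : Prop := ∀ (st : List String), Dom_solution st → Pre_solution st → D_solution st → solution st ≠ solution_alt st

-- ===== LEMMAS AND PROOFS =====

-- proof-side view of the token count: structural recursion over the reversed list
def solutionGo (xs : List String) : Int :=
  match xs with
  | [] => 0
  | a :: rest =>
    if a = ".." then
      match _hh : rest with
      | _ :: c :: rest2 =>
        if PySem.Str.strIsalpha c then 1 + solutionGo rest2 else 1 + solutionGo rest
      | _ => 1 + solutionGo rest
    else if a = "," ∨ a = "~" then
      match _hh : rest with
      | c :: rest2 =>
        if PySem.Str.strIsalpha c then 1 + solutionGo rest2 else 1 + solutionGo rest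
      | _ => 1 + solutionGo rest
    else 1 + solutionGo rest

termination_by xs.length
decreasing_by all_goals ((try subst _hh); first | omega | (simp; omega) | simp)

lemma go_nil : solutionGo [] = 0 := by rw [solutionGo]

lemma go_singleton (x : String) : solutionGo [x] = 1 := by
  rw [solutionGo.eq_def]
  by_cases h1 : x = ".." <;> by_cases h2 : x = "," ∨ x = "~" <;> simp_all [go_nil]

lemma go_other (a : String) (rest : List String) (h1 : a ≠ "..") (h2 : ¬(a = "," ∨ a = "~")) :
    solutionGo (a :: rest) = 1 + solutionGo rest := by
  rw [solutionGo.eq_def]; simp_all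

lemma go_pair (a b : String) (rest : List String) (h1 : a ≠ "..") (h2 : a = "," ∨ a = "~")
    (h3 : PySem.Str.strIsalpha b = true) :
    solutionGo (a :: b :: rest) = 1 + solutionGo rest := by
  rw [solutionGo.eq_def]; simp_all

lemma go_pair_no (a b : String) (rest : List String) (h1 : a ≠ "..") (h2 : a = "," ∨ a = "~")
    (h3 : ¬ PySem.Str.strIsalpha b = true) :
    solutionGo (a :: b :: rest) = 1 + solutionGo (b :: rest) := by
  rw [solutionGo.eq_def]; simp_all

lemma go_trip (a b c : String) (rest : List String) (h1 : a = "..")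
    (h3 : PySem.Str.strIsalpha c = true) :
    solutionGo (a :: b :: c :: rest) = 1 + solutionGo rest := by
  rw [solutionGo.eq_def]; simp_all

lemma go_trip_no (a b c : String) (rest : List String) (h1 : a = "..")
    (h3 : ¬ PySem.Str.strIsalpha c = true) :
    solutionGo (a :: b :: c :: rest) = 1 + solutionGo (b :: c :: rest) := by
  rw [solutionGo.eq_def]; simp_all

lemma go_dot_two (a b : String) (h1 : a = "..") :
    solutionGo [a, b] = 1 + solutionGo [b] := by
  rw [solutionGo.eq_def]; simp_all

-- dp value of a prefix: what Source B's table holds at index j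
def gFun (st : List String) (j : Nat) : Int := solutionGo ((st.take j).reverse)

lemma take_rev (xs : List String) (m : Nat) (h : m < xs.length) :
    (xs.take (m + 1)).reverse = xs[m] :: (xs.take m).reverse := by
  rw [List.take_add_one]; simp [List.getElem?_eq_getElem h]

lemma dpGet (g : Nat → Int) (k i : Nat) (h : i < k) :
    (((List.range k).map g).reverse.getD i 0) = g (k - 1 - i) := by
  rw [List.getD_eq_getElem _ _ (by simpa using h)]
  simp [List.getElem_reverse]

-- the recurrence: the dp value of the k-prefix from the three shorter ones
lemma g_step (st : List String) (k : Nat) (h1 : 1 ≤ k) (h2 : k ≤ st.length) :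
    gFun st k =
      (if (st.getD (k - 1) "" = "," ∨ st.getD (k - 1) "" = "~") ∧ 2 ≤ k ∧
          PySem.Str.strIsalpha (st.getD (k - 2) "") = true then
        gFun st (k - 2) + 1
      else if st.getD (k - 1) "" = ".." ∧ 3 ≤ k ∧
          PySem.Str.strIsalpha (st.getD (k - 3) "") = true then
        gFun st (k - 3) + 1
      else gFun st (k - 1) + 1) := by
  have hk1 : k - 1 < st.length := by omega
  have hx : st.getD (k - 1) "" = st[k - 1] := List.getD_eq_getElem st "" hk1
  have hRk : (st.take k).reverse = st[k - 1] :: (st.take (k - 1)).reverse := by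
    have := take_rev st (k - 1) hk1
    rwa [show k - 1 + 1 = k by omega] at this
  by_cases hp : (st.getD (k - 1) "" = "," ∨ st.getD (k - 1) "" = "~") ∧ 2 ≤ k ∧
      PySem.Str.strIsalpha (st.getD (k - 2) "") = true
  · obtain ⟨hp1, hp2, hp3⟩ := hp
    have hk2 : k - 2 < st.length := by omega
    have hR1 : (st.take (k - 1)).reverse = st[k - 2] :: (st.take (k - 2)).reverse := by
      have := take_rev st (k - 2) hk2
      rwa [show k - 2 + 1 = k - 1 by omega] at this
    have hx1 : st[k - 1] = "," ∨ st[k - 1] = "~" := by rw [← hx]; exact hp1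
    have hne : st[k - 1] ≠ ".." := by rcases hx1 with h | h <;> simp [h]
    have ha : PySem.Str.strIsalpha st[k - 2] = true := by
      rw [← List.getD_eq_getElem st "" hk2]; exact hp3
    rw [if_pos ⟨hp1, hp2, hp3⟩]
    unfold gFun
    rw [hRk, hR1, go_pair _ _ _ hne hx1 ha]; ring
  · rw [if_neg hp]
    by_cases hq : st.getD (k - 1) "" = ".." ∧ 3 ≤ k ∧
        PySem.Str.strIsalpha (st.getD (k - 3) "") = true
    · obtain ⟨hq1, hq2, hq3⟩ := hq
      have hk2 : k - 2 < st.length := by omega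
      have hk3 : k - 3 < st.length := by omega
      have hR1 : (st.take (k - 1)).reverse = st[k - 2] :: (st.take (k - 2)).reverse := by
        have := take_rev st (k - 2) hk2
        rwa [show k - 2 + 1 = k - 1 by omega] at this
      have hR2 : (st.take (k - 2)).reverse = st[k - 3] :: (st.take (k - 3)).reverse := by
        have := take_rev st (k - 3) hk3
        rwa [show k - 3 + 1 = k - 2 by omega] at this
      have hx2 : st[k - 1] = ".." := by rw [← hx]; exact hq1
      have ha : PySem.Str.strIsalpha st[k - 3] = true := by
        rw [← List.getD_eq_getElem st "" hk3]; exact hq3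
      rw [if_pos ⟨hq1, hq2, hq3⟩]
      unfold gFun
      rw [hRk, hR1, hR2, go_trip _ _ _ _ hx2 ha]; ring
    · rw [if_neg hq]
      unfold gFun
      rw [hRk]
      by_cases hx1 : st[k - 1] = "," ∨ st[k - 1] = "~"
      · have hne : st[k - 1] ≠ ".." := by rcases hx1 with h | h <;> simp [h]
        have hp' : ¬(2 ≤ k ∧ PySem.Str.strIsalpha (st.getD (k - 2) "") = true) := by
          intro h; exact hp ⟨by rw [hx]; exact hx1, h⟩
        by_cases hk2' : 2 ≤ k
        · have hk2 : k - 2 < st.length := by omega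
          have hR1 : (st.take (k - 1)).reverse = st[k - 2] :: (st.take (k - 2)).reverse := by
            have := take_rev st (k - 2) hk2
            rwa [show k - 2 + 1 = k - 1 by omega] at this
          have hna : ¬ PySem.Str.strIsalpha st[k - 2] = true := by
            intro h; exact hp' ⟨hk2', by rw [List.getD_eq_getElem st "" hk2]; exact h⟩
          rw [hR1, go_pair_no _ _ _ hne hx1 hna, ← hR1]; ring
        · have hk1' : k = 1 := by omega
          subst hk1'
          simp only [show (1 : Nat) - 1 = 0 from rfl, List.take_zero, List.reverse_nil]
          rw [go_singleton, go_nil]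
          norm_num
      · by_cases hx2 : st[k - 1] = ".."
        · have hq' : ¬(3 ≤ k ∧ PySem.Str.strIsalpha (st.getD (k - 3) "") = true) := by
            intro h; exact hq ⟨by rw [hx]; exact hx2, h⟩
          by_cases hk3' : 3 ≤ k
          · have hk2 : k - 2 < st.length := by omega
            have hk3 : k - 3 < st.length := by omega
            have hR1 : (st.take (k - 1)).reverse = st[k - 2] :: (st.take (k - 2)).reverse := by
              have := take_rev st (k - 2) hk2
              rwa [show k - 2 + 1 = k - 1 by omega] at this
            have hR2 : (st.take (k - 2)).reverse = st[k - 3] :: (st.take (k - 3)).reverse := by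
              have := take_rev st (k - 3) hk3
              rwa [show k - 3 + 1 = k - 2 by omega] at this
            have hna : ¬ PySem.Str.strIsalpha st[k - 3] = true := by
              intro h; exact hq' ⟨hk3', by rw [List.getD_eq_getElem st "" hk3]; exact h⟩
            rw [hR1, hR2, go_trip_no _ _ _ _ hx2 hna, ← hR2, ← hR1]; ring
          · by_cases hk2' : 2 ≤ k
            · have hk' : k = 2 := by omega
              subst hk'
              have h0 : 0 < st.length := by omega
              have hR1 : (st.take 1).reverse = [st[0]] := by
                have := take_rev st 0 h0; simpa using this
              simp only [show (2 : Nat) - 1 = 1 from rfl]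
              rw [hR1, go_dot_two _ _ hx2]; ring
            · have hk1' : k = 1 := by omega
              subst hk1'
              simp only [show (1 : Nat) - 1 = 0 from rfl, List.take_zero, List.reverse_nil]
              rw [go_singleton, go_nil]
              norm_num
        · rw [go_other _ _ hx2 hx1]; ring

-- one Source B loop iteration at an integer k = a Nat cast, in Nat form
lemma step_natCast (st : List String) (dp : List Int) (k : Nat) (h1 : 1 ≤ k) :
    solutionAltStep st dp (k : Int) =
      (if (st.getD (k - 1) "" = "," ∨ st.getD (k - 1) "" = "~") ∧ 2 ≤ k ∧
          PySem.Str.strIsalpha (st.getD (k - 2) "") = true then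
        (dp.getD 1 0 + 1) :: dp
      else if st.getD (k - 1) "" = ".." ∧ 3 ≤ k ∧
          PySem.Str.strIsalpha (st.getD (k - 3) "") = true then
        (dp.getD 2 0 + 1) :: dp
      else (dp.getD 0 0 + 1) :: dp) := by
  unfold solutionAltStep
  rw [show ((k : Int) - 1).toNat = k - 1 from by omega,
    show ((k : Int) - 2).toNat = k - 2 from by omega,
    show ((k : Int) - 3).toNat = k - 3 from by omega]
  by_cases hp : (st.getD (k - 1) "" = "," ∨ st.getD (k - 1) "" = "~") ∧ 2 ≤ k ∧
      PySem.Str.strIsalpha (st.getD (k - 2) "") = true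
  · rw [if_pos ⟨hp.1, by exact_mod_cast hp.2.1, hp.2.2⟩, if_pos hp]
  · rw [if_neg (fun h => hp ⟨h.1, by exact_mod_cast h.2.1, h.2.2⟩), if_neg hp]
    by_cases hq : st.getD (k - 1) "" = ".." ∧ 3 ≤ k ∧
        PySem.Str.strIsalpha (st.getD (k - 3) "") = true
    · rw [if_pos ⟨hq.1, by exact_mod_cast hq.2.1, hq.2.2⟩, if_pos hq]
    · rw [if_neg (fun h => hq ⟨h.1, by exact_mod_cast h.2.1, h.2.2⟩), if_neg hq]

-- the Nat-form branch on the current dp table produces the next dp cell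
lemma dp_step (st : List String) (k : Nat) (h1 : 1 ≤ k) (hk : k ≤ st.length) :
    (if (st.getD (k - 1) "" = "," ∨ st.getD (k - 1) "" = "~") ∧ 2 ≤ k ∧
          PySem.Str.strIsalpha (st.getD (k - 2) "") = true then
        ((((List.range k).map (gFun st)).reverse.getD 1 0) + 1) ::
          ((List.range k).map (gFun st)).reverse
      else if st.getD (k - 1) "" = ".." ∧ 3 ≤ k ∧
          PySem.Str.strIsalpha (st.getD (k - 3) "") = true then
        ((((List.range k).map (gFun st)).reverse.getD 2 0) + 1) ::
          ((List.range k).map (gFun st)).reverse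
      else ((((List.range k).map (gFun st)).reverse.getD 0 0) + 1) ::
          ((List.range k).map (gFun st)).reverse)
      = ((List.range (k + 1)).map (gFun st)).reverse := by
  have hcons : ((List.range (k + 1)).map (gFun st)).reverse
      = gFun st k :: ((List.range k).map (gFun st)).reverse := by
    rw [List.range_succ]; simp
  rw [hcons]
  by_cases hp : (st.getD (k - 1) "" = "," ∨ st.getD (k - 1) "" = "~") ∧ 2 ≤ k ∧
      PySem.Str.strIsalpha (st.getD (k - 2) "") = true
  · rw [if_pos hp, dpGet _ _ _ (by omega : 1 < k)]
    congr 1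
    rw [g_step st k h1 hk, if_pos hp, show k - 1 - 1 = k - 2 from by omega]
  · rw [if_neg hp]
    by_cases hq : st.getD (k - 1) "" = ".." ∧ 3 ≤ k ∧
        PySem.Str.strIsalpha (st.getD (k - 3) "") = true
    · rw [if_pos hq, dpGet _ _ _ (by omega : 2 < k)]
      congr 1
      rw [g_step st k h1 hk, if_neg hp, if_pos hq, show k - 1 - 2 = k - 3 from by omega]
    · rw [if_neg hq, dpGet _ _ _ (by omega : 0 < k)]
      congr 1
      rw [g_step st k h1 hk, if_neg hp, if_neg hq, show k - 1 - 0 = k - 1 from by omega]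

-- the fold over range(1, k+1) builds the whole dp table (latest first)
lemma alt_foldl (st : List String) :
    ∀ k : Nat, k ≤ st.length →
      (PySem.List.pyRange 1 ((k : Int) + 1) 1).foldl (solutionAltStep st) [0]
        = ((List.range (k + 1)).map (gFun st)).reverse := by
  intro k
  induction k with
  | zero =>
    intro _
    rw [PySem.List.pyRange_one_eq_nil (by norm_num)]
    simp [gFun, go_nil]
  | succ k ih =>
    intro hk
    rw [show ((k + 1 : Nat) : Int) + 1 = ((k : Int) + 1) + 1 from by push_cast; ring,
      PySem.List.pyRange_one_succ_right (by omega : (1 : Int) ≤ (k : Int) + 1),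
      List.foldl_append, ih (by omega)]
    simp only [List.foldl_cons, List.foldl_nil]
    rw [show ((k : Int) + 1) = ((k + 1 : Nat) : Int) from by push_cast; ring,
      step_natCast st _ (k + 1) (by omega), dp_step st (k + 1) (by omega) hk]

lemma solution_alt_eq_go (st : List String) : solution_alt st = solutionGo st.reverse := by
  unfold solution_alt
  rw [PySem.List.len_eq, alt_foldl st st.length le_rfl, List.range_succ]
  simp [gFun, List.take_length]

lemma bad_of (st : List String) (hD : ¬ D_solution st) (h3 : 3 ≤ st.length)
    (h1 : st.getD 1 "" = "..")
    (hl : PySem.Str.strIsalpha (st.getD (st.length - 1) "") = true) :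
    st.getD 2 "" = ".." ∧ PySem.Str.strIsalpha (st.getD 0 "") = true := by
  unfold D_solution at hD; tauto

lemma loop_neg (st : List String) (idx : Int) (h : idx < 0) (c : Int) :
    solutionLoop st idx c = some c := by
  rw [solutionLoop]; simp [h]

lemma loop_eq_go (st : List String) (hPre : st ≠ [".."]) (hD : ¬ D_solution st) :
    ∀ k : Nat, k ≤ st.length →
      ¬(k = 2 ∧ st.getD 1 "" = ".." ∧
          PySem.Str.strIsalpha (st.getD (st.length - 1) "") = true) →
      ∀ c : Int,
        solutionLoop st ((k : Int) - 1) c = some (c + solutionGo ((st.take k).reverse)) := by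
  intro k
  induction k using Nat.strong_induction_on with
  | _ k ih =>
  intro hk hbad c
  match k, hk, hbad, ih with
  | 0, hk, hbad, ih =>
    rw [loop_neg st _ (by omega)]; simp [go_nil]
  | 1, hk, hbad, ih =>
    -- idx = 0 : whatever A does here it returns count+1; B counts the single element as 1
    have h0 : 0 < st.length := by omega
    have hR : (st.take 1).reverse = [st[0]] := by
      have := take_rev st 0 h0; simpa using this
    rw [show ((1 : Nat) : Int) - 1 = ((0 : Nat) : Int) by norm_num, solutionLoop.eq_def,
      dif_neg (by omega : ¬ ((0 : Nat) : Int) < 0),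
      PySem.List.pyGet?_natCast, List.getElem?_eq_getElem h0]
    simp only []
    rw [hR, go_singleton]
    by_cases hx1 : st[0] = "," ∨ st[0] = "~"
    · rw [if_pos hx1,
        show ((0 : Nat) : Int) - 1 = (-1 : Int) by norm_num, PySem.List.pyGet?_neg_one,
        List.getLast?_eq_getElem?, List.getElem?_eq_getElem (by omega : st.length - 1 < st.length)]
      simp only []
      by_cases ha : PySem.Str.strIsalpha st[st.length - 1] = true
      · rw [if_pos ha, loop_neg st _ (by omega)]
      · rw [if_neg ha, loop_neg st _ (by omega)]
    · rw [if_neg hx1]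
      by_cases hx2 : st[0] = ".."
      · rw [if_pos hx2]
        have hlen2 : 2 ≤ st.length := by
          by_contra hcon
          have h1 : st.length = 1 := by omega
          obtain ⟨a, ha'⟩ := List.length_eq_one_iff.mp h1
          apply hPre
          rw [ha']
          have : st[0] = a := by simp [ha']
          rw [← this, hx2]
        rw [show ((0 : Nat) : Int) - 2 = (-2 : Int) by norm_num,
          PySem.List.pyGet?_neg_ofNat st 2 (by norm_num) (by exact_mod_cast hlen2),
          List.getElem?_eq_getElem (by omega : st.length - 2 < st.length)]
        simp only []
        by_cases ha : PySem.Str.strIsalpha st[st.length - 2] = true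
        · rw [if_pos ha, loop_neg st _ (by omega)]
        · rw [if_neg ha, loop_neg st _ (by omega)]
      · rw [if_neg hx2, loop_neg st _ (by omega)]
  | 2, hk, hbad, ih =>
    -- idx = 1 : A may read st[-1] here; hbad rules the harmful case out
    have h1 : 1 < st.length := by omega
    have h0 : 0 < st.length := by omega
    have hR1 : (st.take 1).reverse = [st[0]] := by
      have := take_rev st 0 h0; simpa using this
    have hR2 : (st.take 2).reverse = [st[1], st[0]] := by
      have t1 := take_rev st 1 h1
      rw [show (1 : Nat) + 1 = 2 from rfl] at t1
      rw [t1, hR1]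
    rw [show ((2 : Nat) : Int) - 1 = ((1 : Nat) : Int) by norm_num, solutionLoop.eq_def,
      dif_neg (by omega : ¬ ((1 : Nat) : Int) < 0),
      PySem.List.pyGet?_natCast, List.getElem?_eq_getElem h1]
    simp only []
    rw [hR2]
    by_cases hx1 : st[1] = "," ∨ st[1] = "~"
    · have hne : st[1] ≠ ".." := by rcases hx1 with h | h <;> simp [h]
      have hg : PySem.List.pyGet? st (((1 : Nat) : Int) - 1) = some st[0] := by
        rw [show ((1 : Nat) : Int) - 1 = ((0 : Nat) : Int) by norm_num,
          PySem.List.pyGet?_natCast, List.getElem?_eq_getElem h0]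
      rw [if_pos hx1, hg]
      simp only []
      by_cases ha : PySem.Str.strIsalpha st[0] = true
      · rw [if_pos ha, loop_neg st _ (by omega), go_pair _ _ _ hne hx1 ha, go_nil]
        norm_num
      · rw [if_neg ha, ih 1 (by omega) (by omega) (by simp) (c + 1),
          go_pair_no _ _ _ hne hx1 ha, hR1]
        simp only [Option.some.injEq]; ring
    · rw [if_neg hx1]
      by_cases hx2 : st[1] = ".."
      · have hg : PySem.List.pyGet? st (((1 : Nat) : Int) - 2) = some st[st.length - 1] := by
          rw [show ((1 : Nat) : Int) - 2 = (-1 : Int) by norm_num, PySem.List.pyGet?_neg_one,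
            List.getLast?_eq_getElem?, List.getElem?_eq_getElem (by omega : st.length - 1 < st.length)]
        rw [if_pos hx2, hg]
        simp only []
        by_cases ha : PySem.Str.strIsalpha st[st.length - 1] = true
        · exfalso
          apply hbad
          refine ⟨rfl, ?_, ?_⟩
          · rw [List.getD_eq_getElem st "" h1, hx2]
          · rw [List.getD_eq_getElem st "" (by omega : st.length - 1 < st.length)]; exact ha
        · rw [if_neg ha, ih 1 (by omega) (by omega) (by simp) (c + 1),
            go_dot_two _ _ hx2, hR1]
          simp only [Option.some.injEq]; ring
      · rw [if_neg hx2, ih 1 (by omega) (by omega) (by simp) (c + 1),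
          go_other _ _ hx2 hx1, hR1]
        simp only [Option.some.injEq]; ring
  | (m + 3), hk, hbad, ih =>
    -- idx = m + 2 ≥ 2 : no wraparound in either program
    have hm2 : m + 2 < st.length := by omega
    have hm1 : m + 1 < st.length := by omega
    have hm0 : m < st.length := by omega
    have h3 : 3 ≤ st.length := by omega
    have hR1 : (st.take (m + 1)).reverse = st[m] :: (st.take m).reverse := take_rev st m hm0
    have hR2 : (st.take (m + 2)).reverse = st[m + 1] :: st[m] :: (st.take m).reverse := by
      rw [show m + 2 = (m + 1) + 1 from rfl, take_rev st (m + 1) hm1, hR1]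
    have hR3 : (st.take (m + 3)).reverse
        = st[m + 2] :: st[m + 1] :: st[m] :: (st.take m).reverse := by
      rw [show m + 3 = (m + 2) + 1 from rfl, take_rev st (m + 2) hm2, hR2]
    -- a landing site k' = 2 with the harmful configuration contradicts ¬D_
    have hBadK : st.getD 1 "" = ".." →
        PySem.Str.strIsalpha (st.getD (st.length - 1) "") = true →
        st[2] = ".." ∧ PySem.Str.strIsalpha st[0] = true := by
      intro hb1 hb2
      obtain ⟨h2, h0'⟩ := bad_of st hD h3 hb1 hb2
      rw [List.getD_eq_getElem st "" (by omega : 2 < st.length)] at h2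
      rw [List.getD_eq_getElem st "" (by omega : 0 < st.length)] at h0'
      exact ⟨h2, h0'⟩
    rw [show ((m + 3 : Nat) : Int) - 1 = ((m + 2 : Nat) : Int) by push_cast; ring,
      solutionLoop.eq_def, dif_neg (by omega : ¬ ((m + 2 : Nat) : Int) < 0),
      PySem.List.pyGet?_natCast, List.getElem?_eq_getElem hm2]
    simp only []
    rw [hR3]
    by_cases hx1 : st[m + 2] = "," ∨ st[m + 2] = "~"
    · have hne : st[m + 2] ≠ ".." := by rcases hx1 with h | h <;> simp [h]
      have hg : PySem.List.pyGet? st (((m + 2 : Nat) : Int) - 1) = some st[m + 1] := by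
        rw [show ((m + 2 : Nat) : Int) - 1 = ((m + 1 : Nat) : Int) by push_cast; ring,
          PySem.List.pyGet?_natCast, List.getElem?_eq_getElem hm1]
      rw [if_pos hx1, hg]
      simp only []
      by_cases ha : PySem.Str.strIsalpha st[m + 1] = true
      · rw [if_pos ha,
          show ((m + 2 : Nat) : Int) - 2 = ((m + 1 : Nat) : Int) - 1 by push_cast; ring]
        rw [ih (m + 1) (by omega) (by omega) ?hb (c + 1)]
        case hb =>
          rintro ⟨h2, hb1, hb2⟩
          obtain ⟨hg2, -⟩ := hBadK hb1 hb2
          have h21 : st[m + 1] = ".." := by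
            have hm : m = 1 := by omega
            subst hm; exact hg2
          rw [h21] at ha
          exact absurd ha (by decide)
        rw [go_pair _ _ _ hne hx1 ha, hR1]
        simp only [Option.some.injEq]; ring
      · rw [if_neg ha, ih (m + 2) (by omega) (by omega) ?hb (c + 1)]
        case hb =>
          rintro ⟨h2, hb1, hb2⟩
          obtain ⟨hg2, -⟩ := hBadK hb1 hb2
          refine hne ?_
          have hm : m = 0 := by omega
          subst hm; exact hg2
        rw [go_pair_no _ _ _ hne hx1 ha, hR2]
        simp only [Option.some.injEq]; ring
    · rw [if_neg hx1]
      by_cases hx2 : st[m + 2] = ".."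
      · have hg : PySem.List.pyGet? st (((m + 2 : Nat) : Int) - 2) = some st[m] := by
          rw [show ((m + 2 : Nat) : Int) - 2 = ((m : Nat) : Int) by push_cast; ring,
            PySem.List.pyGet?_natCast, List.getElem?_eq_getElem hm0]
        rw [if_pos hx2, hg]
        simp only []
        by_cases ha : PySem.Str.strIsalpha st[m] = true
        · rw [if_pos ha,
            show ((m + 2 : Nat) : Int) - 3 = ((m : Nat) : Int) - 1 by push_cast; ring]
          rw [ih m (by omega) (by omega) ?hb (c + 1)]
          case hb =>
            rintro ⟨h2, hb1, hb2⟩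
            obtain ⟨hg2, -⟩ := hBadK hb1 hb2
            have h21 : st[m] = ".." := by subst h2; exact hg2
            rw [h21] at ha
            exact absurd ha (by decide)
          rw [go_trip _ _ _ _ hx2 ha]
          simp only [Option.some.injEq]; ring
        · rw [if_neg ha, ih (m + 2) (by omega) (by omega) ?hb (c + 1)]
          case hb =>
            rintro ⟨h2, hb1, hb2⟩
            obtain ⟨-, hg0⟩ := hBadK hb1 hb2
            refine ha ?_
            have hm : m = 0 := by omega
            subst hm; exact hg0
          rw [go_trip_no _ _ _ _ hx2 ha, hR2]
          simp only [Option.some.injEq]; ring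
      · rw [if_neg hx2, ih (m + 2) (by omega) (by omega) ?hb (c + 1)]
        case hb =>
          rintro ⟨h2, hb1, hb2⟩
          obtain ⟨hg2, -⟩ := hBadK hb1 hb2
          refine hx2 ?_
          have hm : m = 0 := by omega
          subst hm; exact hg2
        rw [go_other _ _ hx2 hx1, hR2]
        simp only [Option.some.injEq]; ring

-- the same walk, inside D_: A reaches index 1, wraps around to st[-1] and counts one less than B
lemma loop_eq_go_bad (st : List String) (hD : D_solution st) :
    ∀ k : Nat, 2 ≤ k → k ≤ st.length → ∀ c : Int,
      solutionLoop st ((k : Int) - 1) c = some (c + solutionGo ((st.take k).reverse) - 1) := by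
  obtain ⟨h3, hb1, hb2, hno⟩ := hD
  have h1lt : 1 < st.length := by omega
  rw [List.getD_eq_getElem st "" h1lt] at hb1
  rw [List.getD_eq_getElem st "" (by omega : st.length - 1 < st.length)] at hb2
  have hno' : ¬(st[2] = ".." ∧ PySem.Str.strIsalpha st[0] = true) := by
    rw [List.getD_eq_getElem st "" (by omega : 2 < st.length),
      List.getD_eq_getElem st "" (by omega : 0 < st.length)] at hno
    exact hno
  intro k
  induction k using Nat.strong_induction_on with
  | _ k ih =>
  intro hk2 hk c
  match k, hk2, hk, ih with
  | 2, hk2, hk, ih =>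
    have h0 : 0 < st.length := by omega
    have hR1 : (st.take 1).reverse = [st[0]] := by
      have := take_rev st 0 h0; simpa using this
    have hR2 : (st.take 2).reverse = [st[1], st[0]] := by
      have t1 := take_rev st 1 h1lt
      rw [show (1 : Nat) + 1 = 2 from rfl] at t1
      rw [t1, hR1]
      try rfl
    rw [show ((2 : Nat) : Int) - 1 = ((1 : Nat) : Int) by norm_num, solutionLoop.eq_def,
      dif_neg (by omega : ¬ ((1 : Nat) : Int) < 0),
      PySem.List.pyGet?_natCast, List.getElem?_eq_getElem h1lt]
    simp only []
    rw [hR2]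
    have hx1 : ¬(st[1]'h1lt = "," ∨ st[1]'h1lt = "~") := by
      rintro (h | h) <;> exact absurd (h.symm.trans hb1) (by decide)
    have hb1' : st[1]'h1lt = ".." := hb1
    rw [if_neg hx1, if_pos hb1']
    have hl1 : st.length - 1 < st.length := by omega
    have hg : PySem.List.pyGet? st (((1 : Nat) : Int) - 2) = some (st[st.length - 1]'hl1) := by
      rw [show ((1 : Nat) : Int) - 2 = (-1 : Int) by norm_num, PySem.List.pyGet?_neg_one,
        List.getLast?_eq_getElem?, List.getElem?_eq_getElem hl1]
    rw [hg]
    simp only []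
    have hb2' : PySem.Str.strIsalpha (st[st.length - 1]'hl1) = true := hb2
    rw [if_pos hb2', loop_neg st _ (by omega), go_dot_two _ _ (by exact hb1), go_singleton]
    simp only [Option.some.injEq]; ring
  | (m + 3), hk2, hk, ih =>
    have hm2 : m + 2 < st.length := by omega
    have hm1 : m + 1 < st.length := by omega
    have hm0 : m < st.length := by omega
    have hR1 : (st.take (m + 1)).reverse = st[m] :: (st.take m).reverse := take_rev st m hm0
    have hR2 : (st.take (m + 2)).reverse = st[m + 1] :: st[m] :: (st.take m).reverse := by
      rw [show m + 2 = (m + 1) + 1 from rfl, take_rev st (m + 1) hm1, hR1]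
    have hR3 : (st.take (m + 3)).reverse
        = st[m + 2] :: st[m + 1] :: st[m] :: (st.take m).reverse := by
      rw [show m + 3 = (m + 2) + 1 from rfl, take_rev st (m + 2) hm2, hR2]
    rw [show ((m + 3 : Nat) : Int) - 1 = ((m + 2 : Nat) : Int) by push_cast; ring,
      solutionLoop.eq_def, dif_neg (by omega : ¬ ((m + 2 : Nat) : Int) < 0),
      PySem.List.pyGet?_natCast, List.getElem?_eq_getElem hm2]
    simp only []
    rw [hR3]
    by_cases hx1 : st[m + 2] = "," ∨ st[m + 2] = "~"
    · have hne : st[m + 2] ≠ ".." := by rcases hx1 with h | h <;> simp [h]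
      have hg : PySem.List.pyGet? st (((m + 2 : Nat) : Int) - 1) = some st[m + 1] := by
        rw [show ((m + 2 : Nat) : Int) - 1 = ((m + 1 : Nat) : Int) by push_cast; ring,
          PySem.List.pyGet?_natCast, List.getElem?_eq_getElem hm1]
      rw [if_pos hx1, hg]
      simp only []
      by_cases ha : PySem.Str.strIsalpha st[m + 1] = true
      · have hmpos : 1 ≤ m := by
          by_contra hcon
          have hm : m = 0 := by omega
          have h11 : PySem.Str.strIsalpha ".." = true := by
            rw [← hb1]
            subst hm
            exact ha
          exact absurd h11 (by decide)
        rw [if_pos ha,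
          show ((m + 2 : Nat) : Int) - 2 = ((m + 1 : Nat) : Int) - 1 by push_cast; ring]
        rw [ih (m + 1) (by omega) (by omega) (by omega) (c + 1)]
        rw [go_pair _ _ _ hne hx1 ha, hR1]
        simp only [Option.some.injEq]; ring
      · rw [if_neg ha, ih (m + 2) (by omega) (by omega) (by omega) (c + 1)]
        rw [go_pair_no _ _ _ hne hx1 ha, hR2]
        simp only [Option.some.injEq]; ring
    · rw [if_neg hx1]
      by_cases hx2 : st[m + 2] = ".."
      · have hg : PySem.List.pyGet? st (((m + 2 : Nat) : Int) - 2) = some st[m] := by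
          rw [show ((m + 2 : Nat) : Int) - 2 = ((m : Nat) : Int) by push_cast; ring,
            PySem.List.pyGet?_natCast, List.getElem?_eq_getElem hm0]
        rw [if_pos hx2, hg]
        simp only []
        by_cases ha : PySem.Str.strIsalpha st[m] = true
        · have hm2le : 2 ≤ m := by
            by_contra hcon
            rcases m with _ | _ | m'
            · exact hno' ⟨hx2, ha⟩
            · have h11 : PySem.Str.strIsalpha ".." = true := by
                rw [← hb1]; exact ha
              exact absurd h11 (by decide)
            · omega
          rw [if_pos ha,
            show ((m + 2 : Nat) : Int) - 3 = ((m : Nat) : Int) - 1 by push_cast; ring]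
          rw [ih m (by omega) (by omega) (by omega) (c + 1)]
          rw [go_trip _ _ _ _ hx2 ha]
          simp only [Option.some.injEq]; ring
        · rw [if_neg ha, ih (m + 2) (by omega) (by omega) (by omega) (c + 1)]
          rw [go_trip_no _ _ _ _ hx2 ha, hR2]
          simp only [Option.some.injEq]; ring
      · rw [if_neg hx2, ih (m + 2) (by omega) (by omega) (by omega) (c + 1)]
        rw [go_other _ _ hx2 hx1, hR2]
        simp only [Option.some.injEq]; ring

-- ===== VERDICT (by name: the statement is the Claim_ definition above) =====
theorem solution_spec : Claim_unchanged_solution := by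
  unfold Claim_unchanged_solution
  intro st _hdom hPre
  unfold Spec_solution
  intro hD
  unfold solution
  rw [solution_alt_eq_go, PySem.List.len_eq]
  have hbadtop : ¬(st.length = 2 ∧ st.getD 1 "" = ".." ∧
      PySem.Str.strIsalpha (st.getD (st.length - 1) "") = true) := by
    rintro ⟨h2, hb1, hb2⟩
    have e : st.length - 1 = 1 := by omega
    rw [e, hb1] at hb2
    exact absurd hb2 (by decide)
  rw [loop_eq_go st hPre hD st.length le_rfl hbadtop 0]
  simp [List.take_length]

theorem solution_changed : Claim_changed_solution := by
  unfold Claim_changed_solution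
  refine ⟨by decide, by decide, by decide, ?_, ?_, by decide⟩
  · show solution ["a", "..", "a"] = 2
    unfold solution
    norm_num [solutionLoop, PySem.List.len, PySem.List.pyGet?, PySem.List.pyIdx?]
    decide
  · show solution_alt ["a", "..", "a"] = 3
    rw [solution_alt_eq_go]
    rw [show (["a", "..", "a"] : List String).reverse = ["a", "..", "a"] from by decide]
    rw [go_other "a" _ (by decide) (by decide), go_dot_two ".." "a" rfl, go_singleton]
    norm_num

theorem solution_tight : Claim_exact_solution := by
  unfold Claim_exact_solution
  intro st _hdom hPre hD
  have h3 : 3 ≤ st.length := hD.1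
  unfold solution
  rw [solution_alt_eq_go, PySem.List.len_eq]
  rw [loop_eq_go_bad st hD st.length (by omega) le_rfl 0]
  simp only [List.take_length, Option.getD_some]
  omega
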